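-- pv_equiv track=rewrite | github.com/janfpl/KLBLuxendo | python_gui/klb_codec.py | _xyzct_from_hdf5_shape
-- ===== SOURCE A (Python) =====
-- from typing import Callable, Iterable, Iterator, Sequence
--
-- def _xyzct_from_hdf5_shape(shape: Sequence[int]) -> tuple[int, int, int, int, int]:
--     shape = tuple(int(v) for v in shape)
--     if len(shape) == 3:
--         z_dim, y_dim, x_dim = shape
--         return (x_dim, y_dim, z_dim, 1, 1)
--     if len(shape) == 4:
--         c_dim, z_dim, y_dim, x_dim = shape
--         return (x_dim, y_dim, z_dim, c_dim, 1)
--     if len(shape) == 5: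
--         t_dim, c_dim, z_dim, y_dim, x_dim = shape
--         return (x_dim, y_dim, z_dim, c_dim, t_dim)
--     raise ValueError(f"Expected a 3D, 4D, or 5D HDF5 image dataset, found shape {shape}")
-- ===== SOURCE B (Python) =====
-- def _xyzct_from_hdf5_shape(shape):
--     shape = tuple(int(v) for v in shape)
--     if len(shape) not in (3, 4, 5):
--         raise ValueError(f"Expected a 3D, 4D, or 5D HDF5 image dataset, found shape {shape}")
--     # Single forward pass: a 5-slot shift register seeded with ones; each axis
--     # extent shifts the register, so the last-read (fastest-varying) axis ends
--     # up first. No reversal, no padding, no positional unpacking.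
--     x = y = z = c = t = 1
--     for v in shape:
--         x, y, z, c, t = v, x, y, z, c
--     return (x, y, z, c, t)
-- ===== Notes on version B (the rewrite author's own statement) =====
-- stated objective: alternative
-- what changed: Replaces A's three length-cased positional unpackings by a single forward pass pushing each axis extent through a 5-slot shift register seeded with ones.
import Mathlib
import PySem

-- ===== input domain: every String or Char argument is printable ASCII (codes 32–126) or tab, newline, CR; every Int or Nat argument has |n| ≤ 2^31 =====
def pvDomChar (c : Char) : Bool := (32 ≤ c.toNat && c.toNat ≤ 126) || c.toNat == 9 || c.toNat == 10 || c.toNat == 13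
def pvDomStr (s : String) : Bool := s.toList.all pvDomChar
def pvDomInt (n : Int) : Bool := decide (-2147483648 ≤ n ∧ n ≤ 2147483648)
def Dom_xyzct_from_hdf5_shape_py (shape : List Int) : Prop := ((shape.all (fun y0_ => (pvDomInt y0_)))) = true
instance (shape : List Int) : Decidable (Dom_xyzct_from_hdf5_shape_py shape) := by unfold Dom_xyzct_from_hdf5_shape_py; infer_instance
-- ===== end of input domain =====

-- B replaces A's three length-cased positional unpackings by a single forward pass pushing
-- each axis extent through a 5-slot shift register seeded with ones (objective: alternative).

-- ===== PORT A =====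
def xyzct_from_hdf5_shape_py (shape : List Int) : Int × Int × Int × Int × Int :=
  if shape.length = 3 then
    match shape with
    | [z_dim, y_dim, x_dim] => (x_dim, y_dim, z_dim, 1, 1)
    | _ => (0, 0, 0, 0, 0)  -- unreachable: length = 3
  else if shape.length = 4 then
    match shape with
    | [c_dim, z_dim, y_dim, x_dim] => (x_dim, y_dim, z_dim, c_dim, 1)
    | _ => (0, 0, 0, 0, 0)  -- unreachable: length = 4
  else if shape.length = 5 then
    match shape with
    | [t_dim, c_dim, z_dim, y_dim, x_dim] => (x_dim, y_dim, z_dim, c_dim, t_dim)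
    | _ => (0, 0, 0, 0, 0)  -- unreachable: length = 5
  else
    (0, 0, 0, 0, 0)  -- Python raises ValueError here; excluded by Pre_

-- ===== PORT B =====
-- the loop body: x, y, z, c, t = v, x, y, z, c
def pvShift (st : Int × Int × Int × Int × Int) (v : Int) : Int × Int × Int × Int × Int :=
  (v, st.1, st.2.1, st.2.2.1, st.2.2.2.1)

def xyzct_from_hdf5_shape_py_alt (shape : List Int) : Int × Int × Int × Int × Int :=
  shape.foldl pvShift (1, 1, 1, 1, 1)

-- ===== PRECONDITION & SPEC =====
-- A raises ValueError unless the shape has length 3, 4 or 5.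
def Pre_xyzct_from_hdf5_shape_py (shape : List Int) : Prop :=
  shape.length = 3 ∨ shape.length = 4 ∨ shape.length = 5
instance (shape : List Int) : Decidable (Pre_xyzct_from_hdf5_shape_py shape) := by unfold Pre_xyzct_from_hdf5_shape_py; infer_instance

def pvWitness_xyzct_from_hdf5_shape_py : List Int := [2, 3, 4]

def Spec_xyzct_from_hdf5_shape_py (shape : List Int) (out : Int × Int × Int × Int × Int) : Prop := out = xyzct_from_hdf5_shape_py_alt shape
instance (shape : List Int) (out : Int × Int × Int × Int × Int) : Decidable (Spec_xyzct_from_hdf5_shape_py shape out) := by unfold Spec_xyzct_from_hdf5_shape_py; infer_instance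

-- ===== CLAIM (what is proved, stated in full; the proofs are below) =====
def Claim_equal_xyzct_from_hdf5_shape_py : Prop := ∀ (shape : List Int), Dom_xyzct_from_hdf5_shape_py shape → Pre_xyzct_from_hdf5_shape_py shape → Spec_xyzct_from_hdf5_shape_py shape (xyzct_from_hdf5_shape_py shape)

-- ===== LEMMAS AND PROOFS =====

-- ===== VERDICT (by name: the statement is the Claim_ definition above) =====
theorem xyzct_from_hdf5_shape_py_spec : Claim_equal_xyzct_from_hdf5_shape_py := by
  intro shape _ pre
  unfold Spec_xyzct_from_hdf5_shape_py xyzct_from_hdf5_shape_py xyzct_from_hdf5_shape_py_alt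
  rcases shape with _ | ⟨a, _ | ⟨b, _ | ⟨c, _ | ⟨d, _ | ⟨e, _ | ⟨f, rest⟩⟩⟩⟩⟩⟩ <;>
    simp [Pre_xyzct_from_hdf5_shape_py, pvShift, List.foldl] at pre ⊢
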